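-- pv_equiv track=rewrite | github.com/alebondarenko/comparely | System_demo/Pipeline.py | remove_questions
-- ===== SOURCE A (Python) =====
-- def remove_questions(sentences):
--     sentences_to_delete = []
--     for sentence in sentences:
--         if '?' in sentence:
--             sentences_to_delete.append(sentence)
--     for sentence in sentences_to_delete:
--         del sentences[sentences.index(sentence)]
--     return sentences
-- ===== SOURCE B (Python) =====
-- def remove_questions(sentences):
--     sentences[:] = [s for s in sentences if '?' not in s]
--     return sentences
-- ===== Notes on version B (the rewrite author's own statement) =====
-- stated objective: simpler
-- what changed: Replaces A's two-pass collect-then-search-delete (which rescans the list with .index for every offender) by a single comprehension assigned back through sentences[:], keeping the in-place mutation and identity of the argument list.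
import Mathlib
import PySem

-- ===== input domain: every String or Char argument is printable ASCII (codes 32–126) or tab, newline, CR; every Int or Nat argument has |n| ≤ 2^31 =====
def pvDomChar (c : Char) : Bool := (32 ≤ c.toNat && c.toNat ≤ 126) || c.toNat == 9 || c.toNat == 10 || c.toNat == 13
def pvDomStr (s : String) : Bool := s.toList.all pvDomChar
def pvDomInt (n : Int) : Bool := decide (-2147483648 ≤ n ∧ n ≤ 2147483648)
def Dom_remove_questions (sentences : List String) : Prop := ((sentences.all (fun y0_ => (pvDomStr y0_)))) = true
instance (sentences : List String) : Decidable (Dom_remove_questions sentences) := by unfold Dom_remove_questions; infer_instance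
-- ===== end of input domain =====

-- B replaces A's collect-then-index-delete passes by one in-place filtering comprehension
-- (sentences[:] = …); both A and B mutate the argument list in Python, equivalence here is
-- about the returned value.

-- ===== PORT A =====
-- one deletion step: del sentences[sentences.index(sentence)]
-- (the none branch is unreachable: every deleted sentence is still present)
def rqDelStep (cur : List String) (x : String) : List String :=
  match PySem.List.index? cur x with
  | some i => cur.eraseIdx i
  | none => cur

def remove_questions (sentences : List String) : List String :=
  let sentences_to_delete :=
    sentences.foldl (fun acc s => if PySem.Str.isIn "?" s then acc ++ [s] else acc) []
  sentences_to_delete.foldl rqDelStep sentences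

-- ===== PORT B =====
def remove_questions_alt (sentences : List String) : List String :=
  sentences.filter (fun s => !(PySem.Str.isIn "?" s))

-- ===== PRECONDITION & SPEC =====
def Spec_remove_questions (sentences : List String) (out : List String) : Prop := out = remove_questions_alt sentences
instance (sentences : List String) (out : List String) : Decidable (Spec_remove_questions sentences out) := by unfold Spec_remove_questions; infer_instance

-- ===== CLAIM (what is proved, stated in full; the proofs are below) =====
def Claim_equal_remove_questions : Prop := ∀ (sentences : List String), Dom_remove_questions sentences → Spec_remove_questions sentences (remove_questions sentences)

-- ===== LEMMAS AND PROOFS =====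

-- deleting the first occurrence of x from a::t with x ≠ a keeps the head
theorem rqDelStep_cons_ne (a x : String) (t : List String) (h : x ≠ a) :
    rqDelStep (a :: t) x = a :: rqDelStep t x := by
  unfold rqDelStep
  rw [PySem.List.index?_cons_of_ne t (Ne.symm h)]
  cases PySem.List.index? t x with
  | none => rfl
  | some i => rfl

theorem rqDelStep_cons_self (a : String) (t : List String) :
    rqDelStep (a :: t) a = t := by
  unfold rqDelStep
  rw [PySem.List.index?_cons_self]
  rfl

-- folding deletions of elements all satisfying p over a list headed by a non-p element
theorem foldl_rqDelStep_cons (p : String → Bool) (l : List String) :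
    ∀ (a : String) (s : List String), p a = false → (∀ x ∈ l, p x = true) →
    l.foldl rqDelStep (a :: s) = a :: l.foldl rqDelStep s := by
  induction l with
  | nil => intro a s _ _; rfl
  | cons x xs ih =>
      intro a s ha hall
      have hx : p x = true := hall x (List.mem_cons_self ..)
      have hne : x ≠ a := fun e => by rw [e, ha] at hx; cases hx
      simp only [List.foldl_cons, rqDelStep_cons_ne a x s hne]
      exact ih a (rqDelStep s x) ha (fun y hy => hall y (List.mem_cons_of_mem _ hy))

-- the heart of the equivalence: deleting every p-element (in order) from s filters s
theorem foldl_rqDelStep_filter (p : String → Bool) (s : List String) :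
    (s.filter p).foldl rqDelStep s = s.filter (fun x => !p x) := by
  induction s with
  | nil => rfl
  | cons a t ih =>
      by_cases ha : p a = true
      · simp only [List.filter_cons, ha, if_pos, List.foldl_cons,
          rqDelStep_cons_self, Bool.not_true]
        simpa [ha] using ih
      · have ha' : p a = false := by simpa using ha
        have h1 : (a :: t).filter p = t.filter p := by simp [ha']
        have h2 : (a :: t).filter (fun x => !p x) = a :: t.filter (fun x => !p x) := by
          simp [ha']
        rw [h1, h2, foldl_rqDelStep_cons p (t.filter p) a t ha'
          (fun x hx => (List.mem_filter.mp hx).2)]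
        rw [ih]

-- ===== VERDICT (by name: the statement is the Claim_ definition above) =====
theorem remove_questions_spec : Claim_equal_remove_questions := by
  intro sentences _
  unfold Spec_remove_questions remove_questions remove_questions_alt
  rw [PySem.List.foldl_append_if_eq_filter, List.nil_append]
  exact foldl_rqDelStep_filter _ sentences
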